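-- pv_equiv track=rewrite | github.com/macxu/auto_tutorial | app/modules/string/stringProcessor.py | reverse_and_merge
-- ===== SOURCE A (Python) =====
-- def reverse_and_merge(original_string):
--
--     if not original_string or len(original_string) < 2:
--         return original_string
--
--     result_string = original_string[-1]
--
--     index = len(original_string) - 2
--     while index >= 0:
--         if result_string[-1] != original_string[index]:
--             result_string += original_string[index]
--
--         index -= 1
--
--     return result_string
-- ===== SOURCE B (Python) =====
-- def reverse_and_merge(original_string):
--     s = original_string
--     n = len(s)
--     # keep the last char of every run of equal adjacent chars, then reverse
--     return ''.join(c for i, c in enumerate(s) if i == n - 1 or c != s[i + 1])[::-1]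
-- ===== Notes on version B (the rewrite author's own statement) =====
-- stated objective: simpler
-- what changed: Replaced the backward index while-loop that compares each char to the accumulator's last kept char by a stateless forward comprehension keeping s[i] when i==n-1 or s[i]!=s[i+1] (last char of each run), joined and reversed once at the end.
import Mathlib
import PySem

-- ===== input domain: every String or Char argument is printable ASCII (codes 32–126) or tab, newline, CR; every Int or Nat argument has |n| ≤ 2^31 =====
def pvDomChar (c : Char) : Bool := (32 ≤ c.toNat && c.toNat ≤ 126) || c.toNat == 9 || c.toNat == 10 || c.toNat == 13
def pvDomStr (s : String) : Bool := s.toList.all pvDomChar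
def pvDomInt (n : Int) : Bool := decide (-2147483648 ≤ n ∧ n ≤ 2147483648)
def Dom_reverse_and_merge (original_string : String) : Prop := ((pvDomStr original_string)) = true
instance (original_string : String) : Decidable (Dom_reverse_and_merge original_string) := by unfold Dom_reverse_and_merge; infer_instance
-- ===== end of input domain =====

-- B replaces A's backward while-loop with accumulator-last comparison by a forward
-- comprehension keeping the last char of each run (c != s[i+1]) followed by one reverse
-- (objective: simpler/idiomatic; no speed claim).

-- ===== PORT A =====
-- the while loop, counter k = index + 1 (k = 0 ⇔ index < 0); res is result_string,
-- res.getLast?.getD ' ' is result_string[-1] (res is never empty, so in range)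
def loopA (l : List Char) (res : List Char) : Nat → List Char
  | 0 => res
  | k + 1 =>
    loopA l (if res.getLast?.getD ' ' ≠ l.getD k ' ' then res ++ [l.getD k ' '] else res) k

def reverse_and_merge (original_string : String) : String :=
  let l := original_string.toList
  -- 'not original_string or len(...) < 2' ⇔ length < 2 (empty string is the only falsy string)
  if l.length < 2 then original_string
  else String.ofList (loopA l [l.getD (l.length - 1) ' '] (l.length - 1))

-- ===== PORT B =====
-- the comprehension's filter for index i: keep c = s[i] iff i == n-1 or c != s[i+1]
def bKeep (l : List Char) (n : Nat) (i : Nat) : Option Char :=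
  if i = n - 1 ∨ l.getD i ' ' ≠ l.getD (i + 1) ' ' then some (l.getD i ' ') else none

def reverse_and_merge_alt (original_string : String) : String :=
  let l := original_string.toList
  String.ofList (((List.range l.length).filterMap (bKeep l l.length)).reverse)

-- ===== PRECONDITION & SPEC =====
def Spec_reverse_and_merge (original_string : String) (out : String) : Prop := out = reverse_and_merge_alt original_string
instance (original_string : String) (out : String) : Decidable (Spec_reverse_and_merge original_string out) := by unfold Spec_reverse_and_merge; infer_instance

-- ===== CLAIM (what is proved, stated in full; the proofs are below) =====
def Claim_equal_reverse_and_merge : Prop := ∀ (original_string : String), Dom_reverse_and_merge original_string → Spec_reverse_and_merge original_string (reverse_and_merge original_string)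

-- ===== LEMMAS AND PROOFS =====

-- the filter restricted to indices below n-1 (where 'i == n-1' never fires)
def gKeep (l : List Char) (i : Nat) : Option Char :=
  if l.getD i ' ' ≠ l.getD (i + 1) ' ' then some (l.getD i ' ') else none

theorem bKeep_eq_gKeep (l : List Char) (n i : Nat) (h : i ≠ n - 1) :
    bKeep l n i = gKeep l i := by
  simp [bKeep, gKeep, h]

-- Loop invariant: when loopA is called with counter k, the last kept char equals l[k]
-- (either l[k] was just appended, or it was skipped because it equalled the last kept char);
-- hence each step keeps l[k-1] iff l[k-1] ≠ l[k], exactly B's pairwise filter.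
theorem loopA_eq (l : List Char) :
    ∀ (k : Nat) (res : List Char), res.getLast?.getD ' ' = l.getD k ' ' →
      loopA l res k = res ++ ((List.range k).filterMap (gKeep l)).reverse := by
  intro k
  induction k with
  | zero => intro res _; simp [loopA]
  | succ k ih =>
    intro res hres
    have hstep : loopA l res (k + 1) =
        loopA l (if res.getLast?.getD ' ' ≠ l.getD k ' ' then res ++ [l.getD k ' '] else res) k := rfl
    by_cases h : res.getLast?.getD ' ' = l.getD k ' '
    · -- skipped: l[k] equals the last kept char, and gKeep l k = none
      rw [hstep, if_neg (by simp [h]), ih res h, List.range_succ]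
      have hg : gKeep l k = none := by
        unfold gKeep
        rw [if_neg]
        exact not_not_intro (hres.symm.trans h).symm
      simp [hg]
    · -- appended: new last kept char is l[k], and gKeep l k = some l[k]
      rw [hstep, if_pos h, ih (res ++ [l.getD k ' ']) (by simp), List.range_succ]
      have hg : gKeep l k = some (l.getD k ' ') := by
        simp only [gKeep]
        rw [if_pos]
        intro he
        exact h (hres.trans he.symm)
      simp [hg]

theorem reverse_and_merge_eq_alt (s : String) :
    reverse_and_merge s = reverse_and_merge_alt s := by
  show (if s.toList.length < 2 then s
        else String.ofList (loopA s.toList [s.toList.getD (s.toList.length - 1) ' '] (s.toList.length - 1)))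
      = String.ofList (((List.range s.toList.length).filterMap (bKeep s.toList s.toList.length)).reverse)
  by_cases hlen : s.toList.length < 2
  · rw [if_pos hlen]
    interval_cases h : s.toList.length
    · -- length 0: both sides are the empty string
      have hnil : s.toList = [] := List.eq_nil_of_length_eq_zero h
      have hs : String.ofList s.toList = s := by simp
      rw [← hs, hnil]
      simp
    · -- length 1: the single char is kept (i == n-1), reversed it is s again
      obtain ⟨c, hc⟩ : ∃ c, s.toList = [c] := List.length_eq_one_iff.mp h
      have hs : String.ofList s.toList = s := by simp
      rw [← hs, hc]
      simp [List.range_succ, bKeep]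
  · rw [if_neg hlen]
    have hn : 2 ≤ s.toList.length := by omega
    -- unroll the top index n-1 of B (always kept), rewrite the rest to gKeep, apply loopA_eq
    have hrange : List.range s.toList.length
        = List.range (s.toList.length - 1) ++ [s.toList.length - 1] := by
      conv_lhs => rw [show s.toList.length = (s.toList.length - 1) + 1 by omega]
      exact List.range_succ
    have hcongr : (List.range (s.toList.length - 1)).filterMap (bKeep s.toList s.toList.length)
        = (List.range (s.toList.length - 1)).filterMap (gKeep s.toList) := by
      refine List.filterMap_congr ?_
      intro i hi
      rw [List.mem_range] at hi
      exact bKeep_eq_gKeep s.toList _ i (by omega)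
    have hone : List.filterMap (bKeep s.toList s.toList.length) [s.toList.length - 1]
        = [s.toList.getD (s.toList.length - 1) ' '] := by
      simp [bKeep]
    rw [loopA_eq s.toList (s.toList.length - 1) [s.toList.getD (s.toList.length - 1) ' '] (by simp),
      hrange, List.filterMap_append, hcongr, hone, List.reverse_append, List.reverse_singleton]

-- ===== VERDICT (by name: the statement is the Claim_ definition above) =====
theorem reverse_and_merge_spec : Claim_equal_reverse_and_merge := by
  intro s _
  exact reverse_and_merge_eq_alt s
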